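-- pv_equiv track=rewrite | github.com/Karagul/wqu-1 | WQ_ProgramFlow/ip.py | list_true
-- ===== SOURCE A (Python) =====
-- def list_true(n):
--     list_true = []
--     for i in range(n+1):
--         if (i==0 or i==1):
--             list_true.append(False)
--         else:
--             list_true.append(True)
--
--     return list_true
-- ===== SOURCE B (Python) =====
-- def list_true(n):
--     return [False] * min(n + 1, 2) + [True] * max(0, n - 1)
-- ===== Notes on version B (the rewrite author's own statement) =====
-- stated objective: simpler
-- what changed: Replaced the per-index loop with branch by a closed-form concatenation of two repeated blocks: min(n+1,2) False's followed by max(0,n-1) True's.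
import Mathlib
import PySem

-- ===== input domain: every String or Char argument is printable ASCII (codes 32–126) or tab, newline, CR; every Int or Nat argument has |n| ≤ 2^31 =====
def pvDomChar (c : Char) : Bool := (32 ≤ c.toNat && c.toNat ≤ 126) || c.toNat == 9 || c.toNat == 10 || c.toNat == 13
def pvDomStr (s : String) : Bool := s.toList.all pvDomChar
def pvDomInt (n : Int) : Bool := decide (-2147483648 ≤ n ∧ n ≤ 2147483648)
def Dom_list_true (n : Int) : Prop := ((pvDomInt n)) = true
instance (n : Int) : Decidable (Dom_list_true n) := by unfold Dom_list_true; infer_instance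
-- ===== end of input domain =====

-- B replaces A's per-index loop with a closed-form concatenation of two replicated blocks (objective: simpler).

-- ===== PORT A =====
def list_true (n : Int) : List Bool :=
  (PySem.List.pyRange 0 (n + 1) 1).foldl
    (fun acc i => if i == 0 || i == 1 then acc ++ [false] else acc ++ [true]) []

-- ===== PORT B =====
def list_true_alt (n : Int) : List Bool :=
  List.replicate (min (n + 1) 2).toNat false ++ List.replicate (max 0 (n - 1)).toNat true

-- ===== PRECONDITION & SPEC =====
def Spec_list_true (n : Int) (out : List Bool) : Prop := out = list_true_alt n
instance (n : Int) (out : List Bool) : Decidable (Spec_list_true n out) := by unfold Spec_list_true; infer_instance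

-- ===== CLAIM (what is proved, stated in full; the proofs are below) =====
def Claim_equal_list_true : Prop := ∀ (n : Int), Dom_list_true n → Spec_list_true n (list_true n)

-- ===== LEMMAS AND PROOFS =====

theorem list_true_eq_alt : ∀ (n : Int), list_true n = list_true_alt n := by
  intro n
  rcases lt_or_ge n 0 with hneg | hpos
  · unfold list_true list_true_alt
    rw [PySem.List.pyRange_one_eq_nil (by omega)]
    have h1 : (min (n + 1) 2).toNat = 0 := by omega
    have h2 : (max 0 (n - 1)).toNat = 0 := by omega
    simp [h1, h2]
  · obtain ⟨m, rfl⟩ : ∃ m : Nat, n = (m : Int) := ⟨n.toNat, by omega⟩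
    induction m with
    | zero => decide
    | succ k ih =>
      unfold list_true at ih ⊢
      push_cast
      rw [PySem.List.pyRange_one_succ_right (by omega), List.foldl_append]
      rw [ih (by omega)]
      unfold list_true_alt
      simp only [List.foldl_cons, List.foldl_nil]
      rcases Nat.eq_zero_or_pos k with hk | hk
      · subst hk; decide
      · have hb : ((k : Int) + 1 == 0 || (k : Int) + 1 == 1) = false := by
          simp; omega
        rw [hb, if_neg Bool.false_ne_true]
        have h1 : (min ((k : Int) + 1) 2).toNat = 2 := by omega
        have h1' : (min ((k : Int) + 1 + 1) 2).toNat = 2 := by omega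
        have h2 : (max 0 ((k : Int) - 1)).toNat = k - 1 := by omega
        have h2' : (max 0 ((k : Int) + 1 - 1)).toNat = k := by omega
        simp only [h1, h1', h2, h2', List.append_assoc]
        rw [← List.replicate_succ', Nat.sub_add_cancel hk]

-- ===== VERDICT (by name: the statement is the Claim_ definition above) =====
theorem list_true_spec : Claim_equal_list_true := by
  intro n _
  exact list_true_eq_alt n
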